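-- pv_equiv track=rewrite | github.com/cyxfff/perf-agent | src/perf_agent/agents/toolsmith.py | _heuristic_tools
-- ===== SOURCE A (Python) =====
-- def _heuristic_tools(intent: str, candidates: list[dict[str, str]], preferred_tools: list[str]) -> list[str]:
--     candidate_names = [item["tool"] for item in candidates]
--     if intent == "baseline_runtime":
--         return ["time"] if "time" in candidate_names else candidate_names[:1]
--     if intent == "system_cpu_profile":
--         if "sar" in candidate_names:
--             return ["sar"]
--         if "mpstat" in candidate_names:
--             return ["mpstat"]
--     if intent == "scheduler_context":
--         if "pidstat" in candidate_names:
--             return ["pidstat"]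
--         if "perf_stat" in candidate_names:
--             return ["perf_stat"]
--         if "mpstat" in candidate_names:
--             return ["mpstat"]
--     if intent == "io_wait_detail":
--         if "iostat" in candidate_names:
--             return ["iostat"]
--         if "pidstat" in candidate_names:
--             return ["pidstat"]
--     if intent == "hot_function_callgraph":
--         return ["perf_record"] if "perf_record" in candidate_names else candidate_names[:1]
--     if intent == "temporal_behavior":
--         return ["perf_stat"] if "perf_stat" in candidate_names else candidate_names[:1]
--     for tool in preferred_tools:
--         if tool in candidate_names:
--             return [tool]
--     if not candidate_names:
--         return []
--     if "perf_stat" in candidate_names: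
--         return ["perf_stat"]
--     if "sar" in candidate_names:
--         return ["sar"]
--     return [candidate_names[0]]
-- ===== SOURCE B (Python) =====
-- # Different algorithm: one unified priority sequence per intent, a rank dict
-- # (tool -> first index), then a single argmin pass over the candidate names.
-- # Correct because "first preference present among names" == "candidate name of
-- # minimal rank" (ranks are first indices, so rank 0..k are distinct per tool).
--
-- _RULES = {
--     "baseline_runtime": (["time"], True),
--     "system_cpu_profile": (["sar", "mpstat"], False),
--     "scheduler_context": (["pidstat", "perf_stat", "mpstat"], False),
--     "io_wait_detail": (["iostat", "pidstat"], False),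
--     "hot_function_callgraph": (["perf_record"], True),
--     "temporal_behavior": (["perf_stat"], True),
-- }
--
--
-- def _heuristic_tools(intent: str, candidates: list[dict[str, str]], preferred_tools: list[str]) -> list[str]:
--     prefs, terminal = _RULES.get(intent, ([], False))
--     seq = prefs if terminal else prefs + list(preferred_tools) + ["perf_stat", "sar"]
--     rank = {}
--     for i, tool in enumerate(seq):
--         rank.setdefault(tool, i)
--     names = [item["tool"] for item in candidates]
--     best = None
--     for name in names:
--         r = rank.get(name)
--         if r is not None and (best is None or r < best[0]):
--             best = (r, name)
--     return [best[1]] if best is not None else names[:1]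
-- ===== Notes on version B (the rewrite author's own statement) =====
-- stated objective: faster
-- what changed: Instead of probing each preference for membership in the candidate list (an inner scan per preference), B builds one unified priority sequence per intent, indexes it once into a rank dict, and picks the minimum-rank candidate in a single pass over the candidate names.
import Mathlib
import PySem

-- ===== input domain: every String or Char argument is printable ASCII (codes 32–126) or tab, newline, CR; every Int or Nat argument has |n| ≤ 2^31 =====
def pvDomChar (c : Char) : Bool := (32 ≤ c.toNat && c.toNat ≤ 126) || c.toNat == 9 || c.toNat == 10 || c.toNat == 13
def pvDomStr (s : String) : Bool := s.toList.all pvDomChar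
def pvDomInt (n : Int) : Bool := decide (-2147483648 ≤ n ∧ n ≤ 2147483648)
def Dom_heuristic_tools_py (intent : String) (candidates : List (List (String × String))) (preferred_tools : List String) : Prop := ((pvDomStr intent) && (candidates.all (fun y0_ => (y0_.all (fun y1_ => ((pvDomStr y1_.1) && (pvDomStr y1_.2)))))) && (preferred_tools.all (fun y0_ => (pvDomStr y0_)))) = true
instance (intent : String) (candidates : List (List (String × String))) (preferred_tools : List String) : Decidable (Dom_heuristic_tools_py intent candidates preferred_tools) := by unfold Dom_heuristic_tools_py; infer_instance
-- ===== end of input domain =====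

-- B replaces A's ordered membership probes by a rank dict over one unified priority
-- sequence and a single argmin pass over the candidate names (objective: faster).


-- ===== PORT A =====
-- item["tool"] (first match in the association list; Pre_ guarantees the key is present)
def pvGetTool (item : List (String × String)) : String :=
  (item.lookup "tool").getD ""

def heuristic_tools_py (intent : String) (candidates : List (List (String × String))) (preferred_tools : List String) : List String :=
  let candidate_names := candidates.map pvGetTool
  if intent == "baseline_runtime" then
    (if candidate_names.contains "time" then ["time"] else candidate_names.take 1)
  else if intent == "system_cpu_profile" && candidate_names.contains "sar" then ["sar"]
  else if intent == "system_cpu_profile" && candidate_names.contains "mpstat" then ["mpstat"]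
  else if intent == "scheduler_context" && candidate_names.contains "pidstat" then ["pidstat"]
  else if intent == "scheduler_context" && candidate_names.contains "perf_stat" then ["perf_stat"]
  else if intent == "scheduler_context" && candidate_names.contains "mpstat" then ["mpstat"]
  else if intent == "io_wait_detail" && candidate_names.contains "iostat" then ["iostat"]
  else if intent == "io_wait_detail" && candidate_names.contains "pidstat" then ["pidstat"]
  else if intent == "hot_function_callgraph" then
    (if candidate_names.contains "perf_record" then ["perf_record"] else candidate_names.take 1)
  else if intent == "temporal_behavior" then
    (if candidate_names.contains "perf_stat" then ["perf_stat"] else candidate_names.take 1)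
  else
    match preferred_tools.find? (fun tool => candidate_names.contains tool) with
    | some tool => [tool]
    | none =>
      if candidate_names.isEmpty then []
      else if candidate_names.contains "perf_stat" then ["perf_stat"]
      else if candidate_names.contains "sar" then ["sar"]
      else [candidate_names.headD ""]

-- ===== PORT B =====
def pvRules : PySem.Dict String (List String × Bool) :=
  PySem.Dict.ofList
    [ ("baseline_runtime", (["time"], true))
    , ("system_cpu_profile", (["sar", "mpstat"], false))
    , ("scheduler_context", (["pidstat", "perf_stat", "mpstat"], false))
    , ("io_wait_detail", (["iostat", "pidstat"], false))
    , ("hot_function_callgraph", (["perf_record"], true))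
    , ("temporal_behavior", (["perf_stat"], true)) ]

-- seq = prefs if terminal else prefs + list(preferred_tools) + ["perf_stat", "sar"]
def pvSeq (intent : String) (preferred_tools : List String) : List String :=
  let rule := (pvRules.get? intent).getD ([], false)
  if rule.2 then rule.1 else rule.1 ++ preferred_tools ++ ["perf_stat", "sar"]

-- item["tool"] for B (same Python expression, B-side helper)
def pvToolOf (item : List (String × String)) : String :=
  (item.lookup "tool").getD ""

def heuristic_tools_py_alt (intent : String) (candidates : List (List (String × String))) (preferred_tools : List String) : List String :=
  let seq := pvSeq intent preferred_tools
  -- rank = {}; for i, tool in enumerate(seq): rank.setdefault(tool, i)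
  let rank := seq.zipIdx.foldl (fun d p => d.setdefault p.1 p.2) PySem.Dict.empty
  let names := candidates.map pvToolOf
  -- best = None; for name in names: r = rank.get(name); update best on r < best[0]
  let best := names.foldl (fun best name =>
    match rank.get? name, best with
    | some r, none => some (r, name)
    | some r, some b => if r < b.1 then some (r, name) else best
    | none, _ => best) none
  match best with
  | some b => [b.2]
  | none => names.take 1

-- ===== PRECONDITION & SPEC =====
-- Pre_ excludes candidate entries lacking a "tool" key, on which Python A raises KeyError.
def Pre_heuristic_tools_py (intent : String) (candidates : List (List (String × String))) (preferred_tools : List String) : Prop :=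
  ∀ item ∈ candidates, "tool" ∈ item.map Prod.fst
instance (intent : String) (candidates : List (List (String × String))) (preferred_tools : List String) : Decidable (Pre_heuristic_tools_py intent candidates preferred_tools) := by unfold Pre_heuristic_tools_py; infer_instance

def pvWitness_heuristic_tools_py : String × (List (List (String × String))) × List String :=
  ("scheduler_context", [[("tool", "mpstat")], [("tool", "sar")]], ["time"])

def Spec_heuristic_tools_py (intent : String) (candidates : List (List (String × String))) (preferred_tools : List String) (out : List String) : Prop := out = heuristic_tools_py_alt intent candidates preferred_tools
instance (intent : String) (candidates : List (List (String × String))) (preferred_tools : List String) (out : List String) : Decidable (Spec_heuristic_tools_py intent candidates preferred_tools out) := by unfold Spec_heuristic_tools_py; infer_instance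

-- ===== CLAIM (what is proved, stated in full; the proofs are below) =====
def Claim_equal_heuristic_tools_py : Prop := ∀ (intent : String) (candidates : List (List (String × String))) (preferred_tools : List String), Dom_heuristic_tools_py intent candidates preferred_tools → Pre_heuristic_tools_py intent candidates preferred_tools → Spec_heuristic_tools_py intent candidates preferred_tools (heuristic_tools_py intent candidates preferred_tools)

-- ===== LEMMAS AND PROOFS =====

-- rank lookup: first index of n in seq, as the find? over the enumerated sequence
def pvRankGet (seq : List String) (n : String) : Option Nat :=
  (seq.zipIdx.find? (fun p => p.1 == n)).map (·.2)

-- the setdefault loop builds exactly the first-index table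
theorem pv_setdefault_fold_get (l : List (String × Nat)) (d : PySem.Dict String Nat) (k : String) :
    (l.foldl (fun d p => d.setdefault p.1 p.2) d).get? k =
      (d.get? k).or ((l.find? (fun p => p.1 == k)).map (·.2)) := by
  induction l generalizing d with
  | nil => simp
  | cons p rest ih =>
    simp only [List.foldl_cons, List.find?_cons]
    rw [ih]
    by_cases hk : p.1 = k
    · subst hk
      rw [PySem.Dict.get?_setdefault_self]
      cases h : d.get? p.1 <;> simp [h]
    · have hne : k ≠ p.1 := fun h => hk h.symm
      have hsd : (d.setdefault p.1 p.2).get? k = d.get? k := by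
        by_cases hc : d.contains p.1 = true
        · rw [PySem.Dict.setdefault_of_contains _ _ hc]
        · rw [PySem.Dict.setdefault_of_not_contains _ _ (by simpa using hc)]
          exact PySem.Dict.get?_insert_of_ne _ _ hne
      rw [hsd]
      have hb : (p.1 == k) = false := by simpa using hk
      simp [hb]

theorem pvRankDict_get (seq : List String) (n : String) :
    (seq.zipIdx.foldl (fun d p => d.setdefault p.1 p.2) PySem.Dict.empty).get? n = pvRankGet seq n := by
  rw [pv_setdefault_fold_get]
  simp [pvRankGet]

theorem pvRankGet_nil (n : String) : pvRankGet [] n = none := rfl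

theorem pvRankGet_cons (t : String) (rest : List String) (n : String) :
    pvRankGet (t :: rest) n = if t = n then some 0 else (pvRankGet rest n).map (· + 1) := by
  unfold pvRankGet
  rw [List.zipIdx_cons, List.find?_cons]
  by_cases h : t = n
  · simp [h]
  · have : ((t, 0).1 == n) = false := by simpa using h
    rw [this]
    have hsh : rest.zipIdx 1 = (rest.zipIdx 0).map (fun p => (p.1, p.2 + 1)) := by
      simpa using (List.zipIdx_succ (l := rest) (i := 0))
    rw [hsh, List.find?_map]
    simp [h, Function.comp_def, Option.map_map]

-- the argmin fold, abstracted over the rank function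
def pvBestF (f : String → Option Nat) (names : List String) (acc : Option (Nat × String)) : Option (Nat × String) :=
  names.foldl (fun best name =>
    match f name, best with
    | some r, none => some (r, name)
    | some r, some b => if r < b.1 then some (r, name) else best
    | none, _ => best) acc

theorem pvBestF_none (f : String → Option Nat) :
    ∀ (names : List String) (acc : Option (Nat × String)),
      (∀ n ∈ names, f n = none) → pvBestF f names acc = acc := by
  intro names
  induction names with
  | nil => intro acc _; rfl
  | cons n rest ih =>
    intro acc hf
    unfold pvBestF
    simp only [List.foldl_cons, hf n (by simp)]
    exact ih acc (fun m hm => hf m (by simp [hm]))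

theorem pvBestF_zero_absorb (f : String → Option Nat) (names : List String) (t : String) :
    pvBestF f names (some (0, t)) = some (0, t) := by
  induction names with
  | nil => rfl
  | cons n rest ih =>
    unfold pvBestF
    simp only [List.foldl_cons]
    cases h : f n with
    | none => exact ih
    | some r =>
      simp only [Nat.not_lt_zero, if_false]
      exact ih

theorem pvBestF_head (f : String → Option Nat) (t : String)
    (hft : f t = some 0) (huniq : ∀ n, f n = some 0 → n = t) :
    ∀ (names : List String) (acc : Option (Nat × String)), t ∈ names →
      (∀ b, acc = some b → b.1 = 0 → b.2 = t) →
      pvBestF f names acc = some (0, t) := by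
  intro names
  induction names with
  | nil => intro acc h _; simp at h
  | cons n rest ih =>
    intro acc hmem hacc
    unfold pvBestF
    simp only [List.foldl_cons]
    by_cases hn : n = t
    · subst hn
      rw [hft]
      cases acc with
      | none => exact pvBestF_zero_absorb f rest n
      | some b =>
        by_cases hb : 0 < b.1
        · simp only [hb, if_true]
          exact pvBestF_zero_absorb f rest n
        · have hb0 : b.1 = 0 := by omega
          have hbt : b = (0, n) := Prod.ext hb0 (hacc b rfl hb0)
          simp only [hb, if_false, hbt]
          exact pvBestF_zero_absorb f rest n
    · have hmem' : t ∈ rest := by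
        rcases hmem with _ | h
        · exact absurd rfl hn
        · assumption
      refine ih _ hmem' ?_
      intro b hb hb0
      cases hf : f n with
      | none => simp only [hf] at hb; exact hacc b hb hb0
      | some r =>
        cases hacc' : acc with
        | none =>
          simp only [hf, hacc', Option.some.injEq] at hb
          obtain ⟨hr, hn2⟩ : r = b.1 ∧ n = b.2 := by simpa [Prod.ext_iff] using hb
          rw [← hn2]
          exact huniq n (by rw [hf, hr, hb0])
        | some b' =>
          simp only [hf, hacc'] at hb
          by_cases hr : r < b'.1
          · simp only [hr, if_true, Option.some.injEq] at hb
            obtain ⟨hr2, hn2⟩ : r = b.1 ∧ n = b.2 := by simpa [Prod.ext_iff] using hb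
            rw [← hn2]
            exact huniq n (by rw [hf, hr2, hb0])
          · simp only [hr, if_false] at hb
            exact hacc b (by rw [hacc', hb]) hb0

theorem pvBestF_shift (f f' : String → Option Nat) :
    ∀ (names : List String) (acc : Option (Nat × String)),
      (∀ n ∈ names, f' n = (f n).map (· + 1)) →
      pvBestF f' names (acc.map (fun b => (b.1 + 1, b.2))) =
        (pvBestF f names acc).map (fun b => (b.1 + 1, b.2)) := by
  intro names
  induction names with
  | nil => intro acc _; rfl
  | cons n rest ih =>
    intro acc hf
    have hn := hf n (by simp)
    have hrest : ∀ m ∈ rest, f' m = (f m).map (· + 1) := fun m hm => hf m (by simp [hm])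
    unfold pvBestF
    simp only [List.foldl_cons]
    cases hfn : f n with
    | none =>
      rw [hn, hfn]
      exact ih acc hrest
    | some r =>
      rw [hn, hfn]
      cases acc with
      | none => exact ih (some (r, n)) hrest
      | some b =>
        simp only [Option.map_some]
        by_cases hr : r < b.1
        · simp only [hr, if_true, if_pos (by omega : r + 1 < b.1 + 1)]
          exact ih (some (r, n)) hrest
        · simp only [hr, if_false, if_neg (by omega : ¬ r + 1 < b.1 + 1)]
          exact ih (some b) hrest

theorem pvBestF_main (seq names : List String) :
    Option.map Prod.snd (pvBestF (pvRankGet seq) names none) =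
      seq.find? (fun t => names.contains t) := by
  induction seq with
  | nil =>
    rw [pvBestF_none _ _ _ (fun n _ => pvRankGet_nil n)]
    rfl
  | cons t rest ih =>
    rw [List.find?_cons]
    by_cases h : names.contains t = true
    · simp only [h]
      have hf0 : pvRankGet (t :: rest) t = some 0 := by
        rw [pvRankGet_cons]; simp
      have huniq : ∀ n, pvRankGet (t :: rest) n = some 0 → n = t := by
        intro n hn
        rw [pvRankGet_cons] at hn
        by_cases ht : t = n
        · exact ht.symm
        · rw [if_neg ht] at hn
          cases hr : pvRankGet rest n <;> simp [hr] at hn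
      rw [pvBestF_head (pvRankGet (t :: rest)) t hf0 huniq names none (by simpa using h)
        (by intro b hb _; cases hb)]
      rfl
    · have h' : names.contains t = false := by simpa using h
      simp only [h']
      rw [← ih]
      have hsh : ∀ n ∈ names, pvRankGet (t :: rest) n = (pvRankGet rest n).map (· + 1) := by
        intro n hn
        rw [pvRankGet_cons, if_neg]
        intro ht
        subst ht
        rw [List.contains_eq_mem] at h'
        simp [hn] at h'
      have hs := pvBestF_shift (pvRankGet rest) (pvRankGet (t :: rest)) names none hsh
      simp only [Option.map_none] at hs
      rw [hs, Option.map_map]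
      rfl

-- B computes: first element of the unified sequence present among the names, else names[:1]
theorem pv_alt_eq (intent : String) (candidates : List (List (String × String))) (preferred_tools : List String) :
    heuristic_tools_py_alt intent candidates preferred_tools =
      (match (pvSeq intent preferred_tools).find?
          (fun t => (candidates.map pvToolOf).contains t) with
       | some t => [t]
       | none => (candidates.map pvToolOf).take 1) := by
  unfold heuristic_tools_py_alt
  simp only [pvRankDict_get]
  have hmain := pvBestF_main (pvSeq intent preferred_tools) (candidates.map pvToolOf)
  unfold pvBestF at hmain
  cases hf : (pvSeq intent preferred_tools).find?
      (fun t => (candidates.map pvToolOf).contains t) with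
  | none =>
    rw [hf] at hmain
    rw [Option.map_eq_none_iff.mp hmain]
  | some t =>
    rw [hf] at hmain
    obtain ⟨b, hb, hbt⟩ := Option.map_eq_some_iff.mp hmain
    simp [hb, hbt]

theorem pvToolOf_eq : pvToolOf = pvGetTool := rfl


-- names.take 1 written as A's tail writes it
theorem pv_take_one (names : List String) (h : names.isEmpty = false) :
    names.take 1 = [names.headD ""] := by
  cases names with
  | nil => simp at h
  | cons a l => rfl

-- A's generic tail equals B's scan of preferred_tools ++ ["perf_stat", "sar"] with take-1 fallback
theorem pv_tail (names preferred : List String) :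
    (match preferred.find? (fun tool => names.contains tool) with
     | some tool => [tool]
     | none =>
       if names.isEmpty then []
       else if names.contains "perf_stat" then ["perf_stat"]
       else if names.contains "sar" then ["sar"]
       else [names.headD ""]) =
    (match (preferred ++ ["perf_stat", "sar"]).find? (fun t => names.contains t) with
     | some t => [t]
     | none => names.take 1) := by
  rw [List.find?_append]
  cases hp : preferred.find? (fun tool => names.contains tool) with
  | some tool => simp
  | none =>
    simp only [Option.none_or]
    by_cases he : names = []
    · subst he; simp
    · by_cases hps : "perf_stat" ∈ names
      · simp [List.find?, hps, he]
      · by_cases hsar : "sar" ∈ names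
        · simp [List.find?, hps, hsar, he]
        · simp [List.find?, hps, hsar, he, pv_take_one names (by simpa using he)]

-- ===== VERDICT (by name: the statement is the Claim_ definition above) =====
theorem heuristic_tools_py_spec : Claim_equal_heuristic_tools_py := by
  intro intent candidates preferred_tools _ _
  unfold Spec_heuristic_tools_py
  rw [pv_alt_eq, pvToolOf_eq]
  unfold heuristic_tools_py
  by_cases h1 : intent = "baseline_runtime"
  · subst h1
    have hs : pvSeq "baseline_runtime" preferred_tools = ["time"] := by
      have hg : pvRules.get? "baseline_runtime" = some (["time"], true) := by decide
      simp [pvSeq, hg]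
    rw [hs]
    by_cases hc : "time" ∈ candidates.map pvGetTool <;>
      simp [List.find?, hc]
  by_cases h2 : intent = "system_cpu_profile"
  · subst h2
    have hs : pvSeq "system_cpu_profile" preferred_tools
        = ["sar", "mpstat"] ++ preferred_tools ++ ["perf_stat", "sar"] := by
      have hg : pvRules.get? "system_cpu_profile" = some (["sar", "mpstat"], false) := by decide
      simp [pvSeq, hg]
    rw [hs, List.append_assoc, List.find?_append]
    by_cases hsar : "sar" ∈ candidates.map pvGetTool
    · simp [List.find?, hsar]
    · by_cases hmp : "mpstat" ∈ candidates.map pvGetTool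
      · simp [List.find?, hsar, hmp]
      · have ht := pv_tail (candidates.map pvGetTool) preferred_tools
        simp [List.find?, hsar, hmp] at ht ⊢
        exact ht
  by_cases h3 : intent = "scheduler_context"
  · subst h3
    have hs : pvSeq "scheduler_context" preferred_tools
        = ["pidstat", "perf_stat", "mpstat"] ++ preferred_tools ++ ["perf_stat", "sar"] := by
      have hg : pvRules.get? "scheduler_context" = some (["pidstat", "perf_stat", "mpstat"], false) := by decide
      simp [pvSeq, hg]
    rw [hs, List.append_assoc, List.find?_append]
    by_cases hpid : "pidstat" ∈ candidates.map pvGetTool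
    · simp [List.find?, hpid]
    · by_cases hps : "perf_stat" ∈ candidates.map pvGetTool
      · simp [List.find?, hpid, hps]
      · by_cases hmp : "mpstat" ∈ candidates.map pvGetTool
        · simp [List.find?, hpid, hps, hmp]
        · have ht := pv_tail (candidates.map pvGetTool) preferred_tools
          simp [List.find?, hpid, hps, hmp] at ht ⊢
          exact ht
  by_cases h4 : intent = "io_wait_detail"
  · subst h4
    have hs : pvSeq "io_wait_detail" preferred_tools
        = ["iostat", "pidstat"] ++ preferred_tools ++ ["perf_stat", "sar"] := by
      have hg : pvRules.get? "io_wait_detail" = some (["iostat", "pidstat"], false) := by decide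
      simp [pvSeq, hg]
    rw [hs, List.append_assoc, List.find?_append]
    by_cases hio : "iostat" ∈ candidates.map pvGetTool
    · simp [List.find?, hio]
    · by_cases hpid : "pidstat" ∈ candidates.map pvGetTool
      · simp [List.find?, hio, hpid]
      · have ht := pv_tail (candidates.map pvGetTool) preferred_tools
        simp [List.find?, hio, hpid] at ht ⊢
        exact ht
  by_cases h5 : intent = "hot_function_callgraph"
  · subst h5
    have hs : pvSeq "hot_function_callgraph" preferred_tools = ["perf_record"] := by
      have hg : pvRules.get? "hot_function_callgraph" = some (["perf_record"], true) := by decide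
      simp [pvSeq, hg]
    rw [hs]
    by_cases hc : "perf_record" ∈ candidates.map pvGetTool <;>
      simp [List.find?, hc]
  by_cases h6 : intent = "temporal_behavior"
  · subst h6
    have hs : pvSeq "temporal_behavior" preferred_tools = ["perf_stat"] := by
      have hg : pvRules.get? "temporal_behavior" = some (["perf_stat"], true) := by decide
      simp [pvSeq, hg]
    rw [hs]
    by_cases hc : "perf_stat" ∈ candidates.map pvGetTool <;>
      simp [List.find?, hc]
  -- generic intent: no table entry
  have hg : pvRules.get? intent = none := by
    have e1 : ("baseline_runtime" == intent) = false := by simpa using Ne.symm h1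
    have e2 : ("system_cpu_profile" == intent) = false := by simpa using Ne.symm h2
    have e3 : ("scheduler_context" == intent) = false := by simpa using Ne.symm h3
    have e4 : ("io_wait_detail" == intent) = false := by simpa using Ne.symm h4
    have e5 : ("hot_function_callgraph" == intent) = false := by simpa using Ne.symm h5
    have e6 : ("temporal_behavior" == intent) = false := by simpa using Ne.symm h6
    have hrm : pvRules = PySem.Dict.mk
        [ ("baseline_runtime", (["time"], true))
        , ("system_cpu_profile", (["sar", "mpstat"], false))
        , ("scheduler_context", (["pidstat", "perf_stat", "mpstat"], false))
        , ("io_wait_detail", (["iostat", "pidstat"], false))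
        , ("hot_function_callgraph", (["perf_record"], true))
        , ("temporal_behavior", (["perf_stat"], true)) ] := by decide
    rw [hrm]
    simp [PySem.Dict.get?, e1, e2, e3, e4, e5, e6]
  have hs : pvSeq intent preferred_tools = [] ++ preferred_tools ++ ["perf_stat", "sar"] := by
    simp [pvSeq, hg]
  rw [hs]
  have f1 : (intent == "baseline_runtime") = false := by simpa using h1
  have f2 : (intent == "system_cpu_profile") = false := by simpa using h2
  have f3 : (intent == "scheduler_context") = false := by simpa using h3
  have f4 : (intent == "io_wait_detail") = false := by simpa using h4
  have f5 : (intent == "hot_function_callgraph") = false := by simpa using h5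
  have f6 : (intent == "temporal_behavior") = false := by simpa using h6
  have ht := pv_tail (candidates.map pvGetTool) preferred_tools
  simp only [List.nil_append]
  simp [f1, f2, f3, f4, f5, f6] at ht ⊢
  exact ht
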